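-- pv_equiv track=rewrite | github.com/sciling/airluisa | utils_detec.py | count_df_vehicle_types
-- ===== SOURCE A (Python) =====
-- def count_df_vehicle_types(df, type, cars, bikes, buses, trucks):
--
--     for i in range(0, len(df[type])):
--         if df[type][i]["type"] == "car":
--             cars += 1
--         if df[type][i]["type"] == "motorcycle":
--             bikes += 1
--         if df[type][i]["type"] == "bus":
--             buses += 1
--         if df[type][i]["type"] == "truck":
--             trucks += 1
--
--     return cars, bikes, buses, trucks
-- ===== SOURCE B (Python) =====
-- def count_df_vehicle_types(df, type, cars, bikes, buses, trucks):
--     counts = {}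
--     for d in df[type]:
--         k = d["type"]
--         counts[k] = counts.get(k, 0) + 1
--     return (cars + counts.get("car", 0),
--             bikes + counts.get("motorcycle", 0),
--             buses + counts.get("bus", 0),
--             trucks + counts.get("truck", 0))
-- ===== Notes on version B (the rewrite author's own statement) =====
-- stated objective: idiomatic
-- what changed: B builds one frequency dictionary over the 'type' labels in a single pass and then adds four dictionary lookups to the running totals, instead of A's index-based loop with four per-element equality branches.
import Mathlib
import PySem

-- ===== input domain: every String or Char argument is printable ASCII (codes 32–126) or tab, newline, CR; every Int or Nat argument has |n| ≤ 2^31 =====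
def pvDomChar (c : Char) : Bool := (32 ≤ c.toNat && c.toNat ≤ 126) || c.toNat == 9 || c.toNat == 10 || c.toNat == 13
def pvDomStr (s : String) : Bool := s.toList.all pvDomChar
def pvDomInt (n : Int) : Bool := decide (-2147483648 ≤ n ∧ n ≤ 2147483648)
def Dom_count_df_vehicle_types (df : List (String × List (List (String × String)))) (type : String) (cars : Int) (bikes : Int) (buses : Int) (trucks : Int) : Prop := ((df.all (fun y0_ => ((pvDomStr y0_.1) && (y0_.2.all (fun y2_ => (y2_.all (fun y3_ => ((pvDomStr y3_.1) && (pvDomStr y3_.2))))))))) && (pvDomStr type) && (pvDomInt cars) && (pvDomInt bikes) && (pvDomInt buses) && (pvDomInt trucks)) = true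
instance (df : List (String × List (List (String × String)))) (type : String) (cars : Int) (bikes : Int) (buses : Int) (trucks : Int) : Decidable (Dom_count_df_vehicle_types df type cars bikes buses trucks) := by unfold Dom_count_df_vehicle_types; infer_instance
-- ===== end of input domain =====

-- B replaces A's four per-element branches by one frequency-dictionary pass plus four lookups (idiomatic; same O(n) cost).
-- ===== PORT A =====
-- index loop over range(len(df[type])) with four equality branches; df[type] / row["type"]
-- lookups use .getD with a dummy default — Pre_ guarantees both lookups succeed (KeyError otherwise)
def count_df_vehicle_types (df : List (String × List (List (String × String)))) (type : String) (cars : Int) (bikes : Int) (buses : Int) (trucks : Int) : Int × Int × Int × Int :=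
  let rows := ((PySem.Dict.mk df).get? type).getD []
  (PySem.List.pyRange 0 (rows.length : Int) 1).foldl
    (fun (s : Int × Int × Int × Int) i =>
      let r := PySem.List.pyGetD rows i []
      let t := ((PySem.Dict.mk r).get? "type").getD ""
      let s1 := if t = "car" then (s.1 + 1, s.2.1, s.2.2.1, s.2.2.2) else s
      let s2 := if t = "motorcycle" then (s1.1, s1.2.1 + 1, s1.2.2.1, s1.2.2.2) else s1
      let s3 := if t = "bus" then (s2.1, s2.2.1, s2.2.2.1 + 1, s2.2.2.2) else s2
      if t = "truck" then (s3.1, s3.2.1, s3.2.2.1, s3.2.2.2 + 1) else s3)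
    (cars, bikes, buses, trucks)

-- ===== PORT B =====
-- one frequency-dictionary pass over the rows, then four lookups added to the totals
def count_df_vehicle_types_alt (df : List (String × List (List (String × String)))) (type : String) (cars : Int) (bikes : Int) (buses : Int) (trucks : Int) : Int × Int × Int × Int :=
  let rows := ((PySem.Dict.mk df).get? type).getD []
  let counts := rows.foldl
    (fun (d : PySem.Dict String Int) r =>
      let k := ((PySem.Dict.mk r).get? "type").getD ""
      d.insert k (d.getD k 0 + 1))
    PySem.Dict.empty
  (cars + counts.getD "car" 0, bikes + counts.getD "motorcycle" 0,
   buses + counts.getD "bus" 0, trucks + counts.getD "truck" 0)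

-- ===== PRECONDITION & SPEC =====
-- Pre_ excludes exactly the KeyError cases: `type` missing from df, or a row without key "type".
def Pre_count_df_vehicle_types (df : List (String × List (List (String × String)))) (type : String) (cars : Int) (bikes : Int) (buses : Int) (trucks : Int) : Prop :=
  ((PySem.Dict.mk df).get? type).isSome = true ∧
  ∀ r ∈ ((PySem.Dict.mk df).get? type).getD [], ((PySem.Dict.mk r).get? "type").isSome = true
instance (df : List (String × List (List (String × String)))) (type : String) (cars : Int) (bikes : Int) (buses : Int) (trucks : Int) : Decidable (Pre_count_df_vehicle_types df type cars bikes buses trucks) := by unfold Pre_count_df_vehicle_types; infer_instance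

def pvWitness_count_df_vehicle_types : (List (String × List (List (String × String)))) × String × Int × Int × Int × Int :=
  ([("veh", [[("type", "car")], [("type", "bus")], [("type", "dog")]])], "veh", 1, 2, 3, 4)

def Spec_count_df_vehicle_types (df : List (String × List (List (String × String)))) (type : String) (cars : Int) (bikes : Int) (buses : Int) (trucks : Int) (out : Int × Int × Int × Int) : Prop := out = count_df_vehicle_types_alt df type cars bikes buses trucks
instance (df : List (String × List (List (String × String)))) (type : String) (cars : Int) (bikes : Int) (buses : Int) (trucks : Int) (out : Int × Int × Int × Int) : Decidable (Spec_count_df_vehicle_types df type cars bikes buses trucks out) := by unfold Spec_count_df_vehicle_types; infer_instance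

-- ===== CLAIM (what is proved, stated in full; the proofs are below) =====
def Claim_equal_count_df_vehicle_types : Prop := ∀ (df : List (String × List (List (String × String)))) (type : String) (cars : Int) (bikes : Int) (buses : Int) (trucks : Int), Dom_count_df_vehicle_types df type cars bikes buses trucks → Pre_count_df_vehicle_types df type cars bikes buses trucks → Spec_count_df_vehicle_types df type cars bikes buses trucks (count_df_vehicle_types df type cars bikes buses trucks)

-- ===== LEMMAS AND PROOFS =====

-- the "type" label extracted from a row (used only in the proofs)
def pvLabel (r : List (String × String)) : String := ((PySem.Dict.mk r).get? "type").getD ""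

-- A's loop body as a function of the accumulator and the label (definitionally the port's body)
def pvStep (s : Int × Int × Int × Int) (tt : String) : Int × Int × Int × Int :=
  let s1 := if tt = "car" then (s.1 + 1, s.2.1, s.2.2.1, s.2.2.2) else s
  let s2 := if tt = "motorcycle" then (s1.1, s1.2.1 + 1, s1.2.2.1, s1.2.2.2) else s1
  let s3 := if tt = "bus" then (s2.1, s2.2.1, s2.2.2.1 + 1, s2.2.2.2) else s2
  if tt = "truck" then (s3.1, s3.2.1, s3.2.2.1, s3.2.2.2 + 1) else s3

lemma pvStepEq (s : Int × Int × Int × Int) (tt : String) :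
    pvStep s tt
    = (s.1 + (if tt = "car" then 1 else 0), s.2.1 + (if tt = "motorcycle" then 1 else 0),
       s.2.2.1 + (if tt = "bus" then 1 else 0), s.2.2.2 + (if tt = "truck" then 1 else 0)) := by
  obtain ⟨c, b, u, t⟩ := s
  unfold pvStep
  split_ifs <;> simp_all

lemma pvFoldA (rows : List (List (String × String))) : ∀ (s : Int × Int × Int × Int),
    rows.foldl (fun s r => pvStep s (pvLabel r)) s
    = (s.1 + ((rows.map pvLabel).count "car" : Int),
       s.2.1 + ((rows.map pvLabel).count "motorcycle" : Int),
       s.2.2.1 + ((rows.map pvLabel).count "bus" : Int),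
       s.2.2.2 + ((rows.map pvLabel).count "truck" : Int)) := by
  induction rows with
  | nil => intro s; simp
  | cons r rows ih =>
    intro s
    rw [List.foldl_cons, pvStepEq, ih]
    simp only [List.map_cons, List.count_cons]
    refine Prod.ext ?_ (Prod.ext ?_ (Prod.ext ?_ ?_)) <;> simp only [] <;>
      by_cases h1 : pvLabel r = "car" <;> by_cases h2 : pvLabel r = "motorcycle" <;>
      by_cases h3 : pvLabel r = "bus" <;> by_cases h4 : pvLabel r = "truck" <;>
      simp_all <;> omega

-- A's index loop over range(len(rows)) is the fold over the rows themselves, hence the closed form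
lemma pvAClosed (rows : List (List (String × String))) (c b u t : Int) :
    (PySem.List.pyRange 0 (rows.length : Int) 1).foldl
      (fun (s : Int × Int × Int × Int) i => pvStep s (pvLabel (PySem.List.pyGetD rows i [])))
      (c, b, u, t)
    = (c + ((rows.map pvLabel).count "car" : Int),
       b + ((rows.map pvLabel).count "motorcycle" : Int),
       u + ((rows.map pvLabel).count "bus" : Int),
       t + ((rows.map pvLabel).count "truck" : Int)) :=
  (PySem.List.foldl_pyRange_zero_pyGetD' rows []
    (fun (s : Int × Int × Int × Int) r => pvStep s (pvLabel r)) (c, b, u, t)).trans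
    (pvFoldA rows (c, b, u, t))

-- B's frequency dictionary looks up list counts
lemma pvCountB (rows : List (List (String × String))) (v : String) :
    (rows.foldl
      (fun (d : PySem.Dict String Int) r =>
        let k := pvLabel r
        d.insert k (d.getD k 0 + 1))
      PySem.Dict.empty).getD v 0 = ((rows.map pvLabel).count v : Int) := by
  have h : rows.foldl
      (fun (d : PySem.Dict String Int) r =>
        let k := pvLabel r
        d.insert k (d.getD k 0 + 1))
      PySem.Dict.empty
      = (rows.map pvLabel).foldl (fun d x => d.insert x (d.getD x 0 + 1)) PySem.Dict.empty := by
    rw [List.foldl_map]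
  rw [h, PySem.Dict.getD_foldl_insert_add_one]
  simp [PySem.Dict.getD_empty]

-- B's port equals the closed form
lemma pvBClosed (df : List (String × List (List (String × String)))) (type : String) (c b u t : Int) :
    count_df_vehicle_types_alt df type c b u t
    = (c + (((((PySem.Dict.mk df).get? type).getD []).map pvLabel).count "car" : Int),
       b + (((((PySem.Dict.mk df).get? type).getD []).map pvLabel).count "motorcycle" : Int),
       u + (((((PySem.Dict.mk df).get? type).getD []).map pvLabel).count "bus" : Int),
       t + (((((PySem.Dict.mk df).get? type).getD []).map pvLabel).count "truck" : Int)) := by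
  show (c + ((((PySem.Dict.mk df).get? type).getD []).foldl
        (fun (d : PySem.Dict String Int) r =>
          let k := pvLabel r
          d.insert k (d.getD k 0 + 1)) PySem.Dict.empty).getD "car" 0,
      b + ((((PySem.Dict.mk df).get? type).getD []).foldl
        (fun (d : PySem.Dict String Int) r =>
          let k := pvLabel r
          d.insert k (d.getD k 0 + 1)) PySem.Dict.empty).getD "motorcycle" 0,
      u + ((((PySem.Dict.mk df).get? type).getD []).foldl
        (fun (d : PySem.Dict String Int) r =>
          let k := pvLabel r
          d.insert k (d.getD k 0 + 1)) PySem.Dict.empty).getD "bus" 0,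
      t + ((((PySem.Dict.mk df).get? type).getD []).foldl
        (fun (d : PySem.Dict String Int) r =>
          let k := pvLabel r
          d.insert k (d.getD k 0 + 1)) PySem.Dict.empty).getD "truck" 0) = _
  rw [pvCountB, pvCountB, pvCountB, pvCountB]

-- ===== VERDICT (by name: the statement is the Claim_ definition above) =====
theorem count_df_vehicle_types_spec : Claim_equal_count_df_vehicle_types := by
  intro df type cars bikes buses trucks _ _
  show count_df_vehicle_types df type cars bikes buses trucks = _
  exact (pvAClosed (((PySem.Dict.mk df).get? type).getD []) cars bikes buses trucks).trans
    (pvBClosed df type cars bikes buses trucks).symm
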